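-- pv_equiv track=rewrite | github.com/IvanDec0/Ejercicios_Python | Clase12/comparaciones_ordenamiento.py | buscar_max
-- ===== SOURCE A (Python) =====
-- def buscar_max(lista:list, a, b):
--     """Devuelve la posición del máximo elemento en un segmento de
--         lista de elementos comparables.
--         La lista no debe ser vacía.
--         a y b son las posiciones inicial y final del segmento"""
--     pos_max = a
--     contador = 0
--     for i in range(a + 1, b + 1):
--         if lista[i] > lista[pos_max]:
--             pos_max = i
--         contador += 1
--     return pos_max, contador
-- ===== SOURCE B (Python) =====
-- def buscar_max(lista: list, a, b):
--     if b <= a: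
--         return a, 0
--     seg = [lista[i] for i in range(a, b + 1)]
--     m = max(seg)
--     return a + seg.index(m), b - a
-- ===== Notes on version B (the rewrite author's own statement) =====
-- stated objective: simpler
-- what changed: Replaces the position-tracking comparison loop by: build the segment, take max(), take its first index, and compute the comparison count in closed form b-a (with an explicit empty-segment guard).
import Mathlib
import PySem

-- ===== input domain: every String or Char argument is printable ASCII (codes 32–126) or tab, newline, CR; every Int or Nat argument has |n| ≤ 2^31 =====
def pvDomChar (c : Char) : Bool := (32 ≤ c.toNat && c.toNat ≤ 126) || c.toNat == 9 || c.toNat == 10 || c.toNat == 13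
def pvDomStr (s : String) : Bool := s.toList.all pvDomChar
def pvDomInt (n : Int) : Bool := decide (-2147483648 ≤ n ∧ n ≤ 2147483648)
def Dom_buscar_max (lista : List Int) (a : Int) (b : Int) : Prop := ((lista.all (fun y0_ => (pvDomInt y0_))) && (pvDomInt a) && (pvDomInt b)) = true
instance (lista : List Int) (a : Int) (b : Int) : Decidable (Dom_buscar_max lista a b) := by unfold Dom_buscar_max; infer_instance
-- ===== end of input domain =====

-- B replaces A's position-tracking comparison loop by segment + max() + first index, with the
-- comparison count computed in closed form (objective: simpler).

-- ===== PORT A =====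
def buscar_max (lista : List Int) (a : Int) (b : Int) : Int × Int :=
  (PySem.List.pyRange (a + 1) (b + 1) 1).foldl
    (fun st i =>
      let pos_max := if PySem.List.pyGetD lista i 0 > PySem.List.pyGetD lista st.1 0 then i else st.1
      (pos_max, st.2 + 1))
    (a, 0)

-- ===== PORT B =====
def buscar_max_alt (lista : List Int) (a : Int) (b : Int) : Int × Int :=
  if b ≤ a then (a, 0)
  else
    let seg := (PySem.List.pyRange a (b + 1) 1).map (fun i => PySem.List.pyGetD lista i 0)
    let m := (PySem.List.max? seg (fun y => y)).getD 0
    (a + (((PySem.List.index? seg m).getD 0 : Nat) : Int), b - a)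

-- ===== PRECONDITION & SPEC =====
-- Pre_ excludes exactly the inputs on which the Python A raises IndexError: a nonempty
-- segment (a < b) containing an index outside [-len, len).
def Pre_buscar_max (lista : List Int) (a : Int) (b : Int) : Prop :=
  b ≤ a ∨ (-(lista.length : Int) ≤ a ∧ b < (lista.length : Int))
instance (lista : List Int) (a : Int) (b : Int) : Decidable (Pre_buscar_max lista a b) := by unfold Pre_buscar_max; infer_instance
def pvWitness_buscar_max : List Int × Int × Int := ([3, 1, 4, 1, 5], 1, 4)
def Spec_buscar_max (lista : List Int) (a : Int) (b : Int) (out : Int × Int) : Prop := out = buscar_max_alt lista a b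
instance (lista : List Int) (a : Int) (b : Int) (out : Int × Int) : Decidable (Spec_buscar_max lista a b out) := by unfold Spec_buscar_max; infer_instance

-- ===== CLAIM (what is proved, stated in full; the proofs are below) =====
def Claim_equal_buscar_max : Prop := ∀ (lista : List Int) (a : Int) (b : Int), Dom_buscar_max lista a b → Pre_buscar_max lista a b → Spec_buscar_max lista a b (buscar_max lista a b)

-- ===== LEMMAS AND PROOFS =====

-- The loop invariant: after scanning indices a+1 .. a+n, A's state is (a + K, n) where K is the
-- first index of the maximum of the segment lista[a..a+n], and the value there is that maximum.
theorem buscar_max_invariant (lista : List Int) (a : Int) (n : Nat) :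
    ∃ M K,
      PySem.List.max? ((PySem.List.pyRange a (a + 1 + n) 1).map (fun i => PySem.List.pyGetD lista i 0)) (fun y => y) = some M ∧
      PySem.List.index? ((PySem.List.pyRange a (a + 1 + n) 1).map (fun i => PySem.List.pyGetD lista i 0)) M = some K ∧
      PySem.List.pyGetD lista (a + (K : Int)) 0 = M ∧
      buscar_max lista a (a + n) = (a + (K : Int), (n : Int)) := by
  induction n with
  | zero =>
    refine ⟨PySem.List.pyGetD lista a 0, 0, ?_, ?_, by simp, ?_⟩
    · have h1 : a + 1 + (0 : Nat) = a + 1 := by push_cast; ring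
      rw [h1, PySem.List.pyRange_one_singleton]
      simp [PySem.List.max?_id_cons]
    · have h1 : a + 1 + (0 : Nat) = a + 1 := by push_cast; ring
      rw [h1, PySem.List.pyRange_one_singleton]
      simp [PySem.List.index?]
    · have h2 : a + ((0 : Nat) : Int) = a + 0 := by push_cast; ring
      rw [h2]
      unfold buscar_max
      rw [PySem.List.pyRange_one_eq_nil (by omega)]
      simp
  | succ n ih =>
    obtain ⟨M, K, hmax, hidx, hval, hfold⟩ := ih
    set f := fun i => PySem.List.pyGetD lista i 0 with hf
    set v := f (a + 1 + (n : Int)) with hv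
    have hsplit : PySem.List.pyRange a (a + 1 + ((n : Nat) + 1 : Nat)) 1
        = PySem.List.pyRange a (a + 1 + (n : Int)) 1 ++ [a + 1 + (n : Int)] := by
      have he : (a + 1 + ((n : Nat) + 1 : Nat) : Int) = (a + 1 + (n : Int)) + 1 := by
        push_cast; ring
      rw [he, PySem.List.pyRange_one_succ_right (by omega)]
    have hne : (PySem.List.pyRange a (a + 1 + (n : Int)) 1).map f ≠ [] := by
      intro hnil
      rw [hnil] at hmax
      simp [PySem.List.max?] at hmax
    obtain ⟨x, t, hxt⟩ := List.exists_cons_of_ne_nil hne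
    have hmax' : PySem.List.max? (((PySem.List.pyRange a (a + 1 + (n : Int)) 1).map f) ++ [v]) (fun y => y)
        = some (max M v) := by
      rw [hxt] at hmax ⊢
      rw [PySem.List.max?_id_cons] at hmax
      have : x :: t ++ [v] = x :: (t ++ [v]) := by simp
      rw [this, PySem.List.max?_id_cons, List.foldl_append]
      simp at hmax
      simp [hmax]
    have hlen : ((PySem.List.pyRange a (a + 1 + (n : Int)) 1).map f).length = n + 1 := by
      rw [List.length_map, PySem.List.length_pyRange_one]
      omega
    have hMmem : M ∈ (PySem.List.pyRange a (a + 1 + (n : Int)) 1).map f :=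
      PySem.List.max?_mem hmax
    have hub : ∀ y ∈ (PySem.List.pyRange a (a + 1 + (n : Int)) 1).map f, y ≤ M := by
      intro y hy
      exact PySem.List.max?_isMax hmax y hy
    have hfoldsucc : buscar_max lista a (a + ((n : Nat) + 1 : Nat))
        = (if v > f (a + (K : Int)) then a + 1 + (n : Int) else a + (K : Int), (n : Int) + 1) := by
      unfold buscar_max
      have he : (a + ((n : Nat) + 1 : Nat) + 1 : Int) = a + 1 + ((n : Nat) + 1 : Nat) := by
        push_cast; ring
      have hsplit2 : PySem.List.pyRange (a + 1) (a + 1 + ((n : Nat) + 1 : Nat)) 1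
          = PySem.List.pyRange (a + 1) (a + 1 + (n : Int)) 1 ++ [a + 1 + (n : Int)] := by
        have he' : (a + 1 + ((n : Nat) + 1 : Nat) : Int) = (a + 1 + (n : Int)) + 1 := by
          push_cast; ring
        rw [he', PySem.List.pyRange_one_succ_right (by omega)]
      rw [he, hsplit2, List.foldl_append]
      have he2 : (a + 1 + (n : Int)) = a + (n : Int) + 1 := by ring
      have hprev : (PySem.List.pyRange (a + 1) (a + 1 + (n : Int)) 1).foldl
          (fun st i => ((if PySem.List.pyGetD lista i 0 > PySem.List.pyGetD lista st.1 0 then i else st.1), st.2 + 1)) (a, 0)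
          = (a + (K : Int), (n : Int)) := by
        have := hfold
        unfold buscar_max at this
        rw [he2]
        exact this
      rw [hprev]
      simp only [List.foldl_cons, List.foldl_nil]
      rfl
    by_cases hc : v > M
    · refine ⟨max M v, n + 1, ?_, ?_, ?_, ?_⟩
      · rw [hsplit, List.map_append]; exact hmax'
      · rw [hsplit, List.map_append]
        have hMv : max M v = v := by omega
        have hnotmem : v ∉ (PySem.List.pyRange a (a + 1 + (n : Int)) 1).map f := by
          intro hm
          have := hub v hm
          omega
        rw [hMv]
        simp only [List.map_cons, List.map_nil, ← hv]
        rw [PySem.List.index?_append_singleton_self _ v hnotmem, hlen]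
      · have he : a + (((n : Nat) + 1 : Nat) : Int) = a + 1 + (n : Int) := by push_cast; ring
        rw [he]
        show v = max M v
        omega
      · rw [hfoldsucc]
        rw [show f (a + (K : Int)) = M from hval, if_pos hc]
        have he : a + (((n : Nat) + 1 : Nat) : Int) = a + 1 + (n : Int) := by push_cast; ring
        rw [he, Prod.mk.injEq]
        exact ⟨rfl, by push_cast; ring⟩
    · refine ⟨max M v, K, ?_, ?_, ?_, ?_⟩
      · rw [hsplit, List.map_append]; exact hmax'
      · rw [hsplit, List.map_append]
        have hMv : max M v = M := by omega
        rw [hMv]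
        rw [PySem.List.index?_append_of_mem _ hMmem]
        exact hidx
      · have hMv : max M v = M := by omega
        rw [hMv]; exact hval
      · rw [hfoldsucc]
        rw [show f (a + (K : Int)) = M from hval, if_neg hc, Prod.mk.injEq]
        exact ⟨rfl, by push_cast; ring⟩

theorem buscar_max_eq_nil (lista : List Int) (a b : Int) (h : b ≤ a) :
    buscar_max lista a b = (a, 0) := by
  unfold buscar_max
  rw [PySem.List.pyRange_one_eq_nil (by omega)]
  simp

theorem buscar_max_spec : Claim_equal_buscar_max := by
  intro lista a b _ _
  unfold Spec_buscar_max buscar_max_alt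
  by_cases hba : b ≤ a
  · rw [if_pos hba, buscar_max_eq_nil lista a b hba]
  · rw [if_neg hba]
    obtain ⟨M, K, hmax, hidx, hval, hfold⟩ := buscar_max_invariant lista a ((b - a).toNat)
    have he : a + 1 + (((b - a).toNat : Nat) : Int) = b + 1 := by omega
    rw [he] at hmax hidx
    have he2 : a + (((b - a).toNat : Nat) : Int) = b := by omega
    rw [he2] at hfold
    rw [hfold]
    simp only [hmax, Option.getD_some, hidx]
    rw [Prod.mk.injEq]
    exact ⟨rfl, by omega⟩
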